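-- pv_equiv track=rewrite | github.com/simpoir/adventofcode | 2020/py/aoc/day11.py | gen2
-- ===== SOURCE A (Python) =====
-- dirs = (
--     (-1, -1),
--     (-1, 0),
--     (-1, 1),
--     (0, -1),
--     (0, 1),
--     (1, -1),
--     (1, 0),
--     (1, 1),
-- )
--
-- def gen2(data):
--     graph = {}
--     for y, line in enumerate(data):
--         for x, c in enumerate(line):
--             if c == "L":
--                 branches = graph.setdefault((x, y), [])
--                 for dx, dy in dirs:
--                     try:
--                         xx = x + dx
--                         yy = y + dy
--                         while xx >= 0 and yy >= 0:
--                             try: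
--                                 if data[yy][xx] == "L":
--                                     branches.append((xx, yy))
--                                     raise StopIteration
--                             except IndexError:
--                                 raise StopIteration
--                             xx += dx
--                             yy += dy
--                     except StopIteration:
--                         continue
--     return graph
-- ===== SOURCE B (Python) =====
-- dirs = (
--     (-1, -1),
--     (-1, 0),
--     (-1, 1),
--     (0, -1),
--     (0, 1),
--     (1, -1),
--     (1, 0),
--     (1, 1),
-- )
--
-- def gen2(data):
--     # Dynamic programming: for each direction, compute for EVERY cell the first
--     # visible seat in that direction in one sweep over the grid (each cell reads
--     # the already-computed answer of its neighbour cell), instead of walking a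
--     # ray per seat per direction.
--     R = len(data)
--     f = {}
--     for dx, dy in dirs:
--         g = {}
--         ys = range(R - 1, -1, -1) if dy > 0 else range(R)
--         for y in ys:
--             n = len(data[y])
--             xs = range(n - 1, -1, -1) if dx > 0 else range(n)
--             for x in xs:
--                 xx, yy = x + dx, y + dy
--                 if 0 <= yy < R and 0 <= xx < len(data[yy]):
--                     if data[yy][xx] == "L":
--                         g[(x, y)] = (xx, yy)
--                     else:
--                         g[(x, y)] = g[(xx, yy)]
--                 else:
--                     g[(x, y)] = None
--         f[(dx, dy)] = g
--     graph = {}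
--     for y, line in enumerate(data):
--         for x, c in enumerate(line):
--             if c == "L":
--                 graph[(x, y)] = [t for t in (f[d][(x, y)] for d in dirs) if t is not None]
--     return graph
-- ===== Notes on version B (the rewrite author's own statement) =====
-- stated objective: alternative
-- what changed: B replaces A's per-seat ray walk in 8 directions by one dynamic-programming sweep per direction over all grid cells (each cell reads the already-computed answer of its neighbour cell), then assembles each seat's list from the 8 tables.
import Mathlib
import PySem

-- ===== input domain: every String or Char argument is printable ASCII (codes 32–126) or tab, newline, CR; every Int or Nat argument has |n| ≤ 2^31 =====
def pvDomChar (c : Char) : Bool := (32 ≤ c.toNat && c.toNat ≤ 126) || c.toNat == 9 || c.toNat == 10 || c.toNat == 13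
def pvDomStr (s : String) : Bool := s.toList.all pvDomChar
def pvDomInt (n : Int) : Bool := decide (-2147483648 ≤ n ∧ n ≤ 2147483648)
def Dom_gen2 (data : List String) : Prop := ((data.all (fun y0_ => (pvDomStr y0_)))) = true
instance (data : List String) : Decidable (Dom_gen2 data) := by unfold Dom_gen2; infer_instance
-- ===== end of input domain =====

-- B replaces A's per-seat ray walks by one dynamic-programming sweep per direction
-- (each cell reads its neighbour's already-computed answer); objective: alternative
-- algorithm of similar cost, not claimed faster.

-- ===== PORT A =====

-- module-level constant `dirs`
def dirsL : List (Int × Int) :=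
  [(-1, -1), (-1, 0), (-1, 1), (0, -1), (0, 1), (1, -1), (1, 0), (1, 1)]

-- maximum row length (used for the fuel bound of A's while loop)
def pvMaxW (data : List String) : Nat :=
  data.foldr (fun s m => max s.toList.length m) 0

-- fuel that provably dominates the length of any ray inside the grid
def pvFuel (data : List String) : Nat := data.length + pvMaxW data + 2

-- A's inner `while xx >= 0 and yy >= 0:` loop for one direction; returns the first
-- visible seat (StopIteration with a found seat → some, plain stop → none).
-- The fuel argument is only a totality guard: pvFuel data steps always suffice
-- (each step leaves the grid, finds a seat, or moves one cell closer to a border).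
def walkA (data : List String) (dx dy : Int) : Nat → Int → Int → Option (Int × Int)
  | 0, _, _ => none
  | fuel + 1, xx, yy =>
    if 0 ≤ xx ∧ 0 ≤ yy then
      match PySem.List.pyGet? data yy with
      | none => none                                 -- IndexError → StopIteration
      | some row =>
        match PySem.Str.pyGet? row xx with
        | none => none                               -- IndexError → StopIteration
        | some c =>
          if c = 'L' then some (xx, yy)              -- seat found → StopIteration
          else walkA data dx dy fuel (xx + dx) (yy + dy)
    else none

def gen2 (data : List String) : List (Int × Int × List (Int × Int)) :=
  let graph : PySem.Dict (Int × Int) (List (Int × Int)) :=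
    (PySem.List.enumerate data).foldl (fun graph yl =>
      (PySem.List.enumerate yl.2.toList).foldl (fun graph xc =>
        if xc.2 = 'L' then
          let branches := graph.getD (xc.1, yl.1) []          -- setdefault((x, y), [])
          let branches := dirsL.foldl (fun bs d =>
            match walkA data d.1 d.2 (pvFuel data) (xc.1 + d.1) (yl.1 + d.2) with
            | some t => bs ++ [t]                             -- branches.append((xx, yy))
            | none => bs) branches
          graph.insert (xc.1, yl.1) branches
        else graph) graph) PySem.Dict.empty
  graph.items.map (fun p => (p.1.1, p.1.2, p.2))

-- ===== PORT B =====

-- one cell of B's sweep: store the answer for (x, y) from its neighbour (xx, yy)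
def stepB (data : List String) (dx dy y : Int)
    (g : PySem.Dict (Int × Int) (Option (Int × Int))) (x : Int) :
    PySem.Dict (Int × Int) (Option (Int × Int)) :=
  -- xx = x + dx, yy = y + dy
  g.insert (x, y)
    (if 0 ≤ y + dy ∧ y + dy < (data.length : Int) then
       if 0 ≤ x + dx ∧ x + dx < PySem.Str.len ((PySem.List.pyGet? data (y + dy)).getD "") then
         if PySem.Str.pyGet? ((PySem.List.pyGet? data (y + dy)).getD "") (x + dx) = some 'L' then
           some (x + dx, y + dy)
         else g.getD (x + dx, y + dy) none  -- g[(xx, yy)]: always present (processed earlier)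
       else none
     else none)

def rowB (data : List String) (dx dy : Int)
    (g : PySem.Dict (Int × Int) (Option (Int × Int))) (y : Int) :
    PySem.Dict (Int × Int) (Option (Int × Int)) :=
  let n := PySem.Str.len ((PySem.List.pyGet? data y).getD "")  -- len(data[y]); y in range
  let xs := if 0 < dx then PySem.List.pyRange (n - 1) (-1) (-1) else PySem.List.pyRange 0 n
  xs.foldl (stepB data dx dy y) g

-- the per-direction table g of B
def gTable (data : List String) (dx dy : Int) :
    PySem.Dict (Int × Int) (Option (Int × Int)) :=
  let R : Int := data.length
  let ys := if 0 < dy then PySem.List.pyRange (R - 1) (-1) (-1) else PySem.List.pyRange 0 R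
  ys.foldl (rowB data dx dy) PySem.Dict.empty

def gen2_alt (data : List String) : List (Int × Int × List (Int × Int)) :=
  let f : PySem.Dict (Int × Int) (PySem.Dict (Int × Int) (Option (Int × Int))) :=
    dirsL.foldl (fun f d => f.insert d (gTable data d.1 d.2)) PySem.Dict.empty
  let graph : PySem.Dict (Int × Int) (List (Int × Int)) :=
    (PySem.List.enumerate data).foldl (fun graph yl =>
      (PySem.List.enumerate yl.2.toList).foldl (fun graph xc =>
        if xc.2 = 'L' then
          graph.insert (xc.1, yl.1)
            ((dirsL.map (fun d =>
              (f.getD d PySem.Dict.empty).getD (xc.1, yl.1) none)).filterMap id)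
        else graph) graph) PySem.Dict.empty
  graph.items.map (fun p => (p.1.1, p.1.2, p.2))

-- ===== PRECONDITION & SPEC =====
def Spec_gen2 (data : List String) (out : List (Int × Int × List (Int × Int))) : Prop := out = gen2_alt data
instance (data : List String) (out : List (Int × Int × List (Int × Int))) : Decidable (Spec_gen2 data out) := by unfold Spec_gen2; infer_instance

-- ===== CLAIM (what is proved, stated in full; the proofs are below) =====
def Claim_equal_gen2 : Prop := ∀ (data : List String), Dom_gen2 data → Spec_gen2 data (gen2 data)

-- ===== LEMMAS AND PROOFS =====

-- ---------- basic indexing bridges ----------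

def rowAt (data : List String) (y : Int) : String := (PySem.List.pyGet? data y).getD ""

def rlen (data : List String) (y : Int) : Int := ((rowAt data y).toList.length : Int)

-- the cell (x, y) lies inside the (possibly ragged) grid
def inG (data : List String) (x y : Int) : Prop :=
  0 ≤ y ∧ y < (data.length : Int) ∧ 0 ≤ x ∧ x < rlen data y

theorem listGet_lt {α : Type} (xs : List α) {i : Int} {v : α} (h0 : 0 ≤ i)
    (h : PySem.List.pyGet? xs i = some v) : i < (xs.length : Int) := by
  rw [PySem.List.pyGet?_of_nonneg _ h0] at h
  obtain ⟨hk, -⟩ := List.getElem?_eq_some_iff.mp h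
  omega

theorem strGet_nonneg (s : String) {i : Int} (h0 : 0 ≤ i) :
    PySem.Str.pyGet? s i = s.toList[i.toNat]? := by
  have hi : i = ((i.toNat : Nat) : Int) := by omega
  rw [hi, PySem.Str.pyGet?_natCast]
  congr 1

theorem strGet_lt (s : String) {i : Int} {v : Char} (h0 : 0 ≤ i)
    (h : PySem.Str.pyGet? s i = some v) : i < (s.toList.length : Int) := by
  rw [strGet_nonneg s h0] at h
  obtain ⟨hk, -⟩ := List.getElem?_eq_some_iff.mp h
  omega

theorem strGet_ge (s : String) {i : Int} (h0 : 0 ≤ i)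
    (h : PySem.Str.pyGet? s i = none) : ((s.toList.length : Int)) ≤ i := by
  rw [strGet_nonneg s h0] at h
  have := List.getElem?_eq_none_iff.mp h
  omega

theorem rowAt_eq {data : List String} {y : Int} {line : String}
    (h : PySem.List.pyGet? data y = some line) : rowAt data y = line := by
  simp [rowAt, h]

theorem pyGet?_row (data : List String) {y : Int} (h0 : 0 ≤ y)
    (h1 : y < (data.length : Int)) :
    PySem.List.pyGet? data y = some (rowAt data y) := by
  rw [PySem.List.pyGet?_of_nonneg _ h0]
  have hk : y.toNat < data.length := by omega
  rw [List.getElem?_eq_getElem hk]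
  congr 1
  rw [rowAt, PySem.List.pyGet?_of_nonneg _ h0, List.getElem?_eq_getElem hk]
  rfl

-- ---------- characterisation of A's while loop, one step at a time ----------

-- the measure a ray decreases: distance to the border it is walking towards
def pvMu (data : List String) (dx dy xx yy : Int) : Nat :=
  (if 0 < dy then (data.length : Int) - yy
   else if dy < 0 then yy + 1
   else if 0 < dx then (pvMaxW data : Int) - xx
   else xx + 1).toNat

theorem pvMaxW_le {data : List String} {s : String} (h : s ∈ data) :
    s.toList.length ≤ pvMaxW data := by
  induction data with
  | nil => cases h
  | cons a l ih =>
    rcases List.mem_cons.mp h with h | h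
    · subst h; exact Nat.le_max_left _ _
    · exact le_trans (ih h) (Nat.le_max_right _ _)

theorem mu_decr (data : List String) {dx dy xx yy : Int} {row : String} {c : Char}
    (hz : ¬ (dx = 0 ∧ dy = 0)) (h0 : 0 ≤ xx ∧ 0 ≤ yy)
    (hr : PySem.List.pyGet? data yy = some row)
    (hc : PySem.Str.pyGet? row xx = some c) :
    pvMu data dx dy (xx + dx) (yy + dy) < pvMu data dx dy xx yy := by
  have hylt := listGet_lt data h0.2 hr
  have hxlt := strGet_lt row h0.1 hc
  have hrow : row ∈ data := PySem.List.mem_of_pyGet?_eq_some _ hr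
  have hW : (row.toList.length : Int) ≤ (pvMaxW data : Int) := by
    exact_mod_cast pvMaxW_le hrow
  have hx := h0.1
  have hy := h0.2
  unfold pvMu
  split_ifs <;> omega

-- when the measure is exhausted the walk has already left the grid
theorem walk_mu_zero (data : List String) (dx dy : Int) (_hz : ¬ (dx = 0 ∧ dy = 0)) :
    ∀ (fuel : Nat) (xx yy : Int), pvMu data dx dy xx yy = 0 →
      walkA data dx dy fuel xx yy = none := by
  intro fuel xx yy hmu
  cases fuel with
  | zero => rfl
  | succ fuel =>
    rw [walkA]
    by_cases h0 : 0 ≤ xx ∧ 0 ≤ yy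
    · rw [if_pos h0]
      split
      · rfl
      · next row hr =>
        have hylt := listGet_lt data h0.2 hr
        split
        · rfl
        · next c hc =>
          exfalso
          have hxlt := strGet_lt row h0.1 hc
          have hW : (row.toList.length : Int) ≤ (pvMaxW data : Int) := by
            exact_mod_cast pvMaxW_le (PySem.List.mem_of_pyGet?_eq_some _ hr)
          have hx := h0.1
          have hy := h0.2
          unfold pvMu at hmu
          split_ifs at hmu <;> omega
    · rw [if_neg h0]

-- any two sufficient fuels give the same walk result
theorem walk_stable (data : List String) (dx dy : Int) (hz : ¬ (dx = 0 ∧ dy = 0)) :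
    ∀ (fuel fuel' : Nat) (xx yy : Int),
      pvMu data dx dy xx yy ≤ fuel → pvMu data dx dy xx yy ≤ fuel' →
      walkA data dx dy fuel xx yy = walkA data dx dy fuel' xx yy := by
  intro fuel
  induction fuel with
  | zero =>
    intro fuel' xx yy hmu hmu'
    rw [walk_mu_zero data dx dy hz 0 xx yy (by omega),
      walk_mu_zero data dx dy hz fuel' xx yy (by omega)]
  | succ fuel ih =>
    intro fuel' xx yy hmu hmu'
    cases fuel' with
    | zero =>
      rw [walk_mu_zero data dx dy hz 0 xx yy (by omega),
        walk_mu_zero data dx dy hz (fuel + 1) xx yy (by omega)]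
    | succ fuel' =>
      rw [walkA, walkA]
      by_cases h0 : 0 ≤ xx ∧ 0 ≤ yy
      · rw [if_pos h0, if_pos h0]
        split
        · rfl
        · next row hr =>
          split
          · rfl
          · next c hc =>
            by_cases hL : c = 'L'
            · rw [if_pos hL, if_pos hL]
            · rw [if_neg hL, if_neg hL]
              have hdec := mu_decr data hz h0 hr hc
              exact ih fuel' (xx + dx) (yy + dy) (by omega) (by omega)
      · rw [if_neg h0, if_neg h0]

-- the measure of any cell still inside the grid fits under the chosen fuel
theorem mu_le_fuel (data : List String) (dx dy xx yy : Int) (hin : inG data xx yy) :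
    pvMu data dx dy xx yy + 1 < pvFuel data := by
  obtain ⟨hy0, hy1, hx0, hx1⟩ := hin
  have hW : rlen data yy ≤ (pvMaxW data : Int) := by
    have : rowAt data yy ∈ data :=
      PySem.List.mem_of_pyGet?_eq_some _ (pyGet?_row data hy0 hy1)
    rw [rlen]
    exact_mod_cast pvMaxW_le this
  rw [pvFuel, pvMu]
  split_ifs <;> omega

theorem walkA_stop (data : List String) (dx dy : Int) (fuel : Nat) (xx yy : Int)
    (h : ¬ inG data xx yy) :
    walkA data dx dy fuel xx yy = none := by
  cases fuel with
  | zero => rfl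
  | succ fuel =>
    rw [walkA]
    by_cases h0 : 0 ≤ xx ∧ 0 ≤ yy
    · rw [if_pos h0]
      split
      · rfl
      · next row hr =>
        have hylt := listGet_lt data h0.2 hr
        have hrA := rowAt_eq hr
        split
        · rfl
        · next c hc =>
          have hxlt := strGet_lt row h0.1 hc
          refine absurd ⟨h0.2, hylt, h0.1, ?_⟩ h
          rw [rlen, hrA]
          exact hxlt
    · rw [if_neg h0]

theorem walkA_seat (data : List String) (dx dy : Int) (xx yy : Int)
    (hin : inG data xx yy)
    (hL : PySem.Str.pyGet? (rowAt data yy) xx = some 'L') :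
    walkA data dx dy (pvFuel data) xx yy = some (xx, yy) := by
  obtain ⟨hy0, hy1, hx0, hx1⟩ := hin
  have hfuel : pvFuel data = (data.length + pvMaxW data + 1) + 1 := rfl
  rw [hfuel, walkA, if_pos ⟨hx0, hy0⟩]
  have hr := pyGet?_row data hy0 hy1
  split
  · next h => rw [h] at hr; cases hr
  · next row h =>
    have hrow : row = rowAt data yy := by
      rw [h] at hr; exact Option.some.inj hr
    split
    · next hc => rw [hrow] at hc; rw [hc] at hL; cases hL
    · next c hc =>
      rw [hrow] at hc
      have : c = 'L' := Option.some.inj (hc.symm.trans hL)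
      rw [if_pos this]

theorem walkA_go (data : List String) (dx dy : Int) (hz : ¬ (dx = 0 ∧ dy = 0))
    (xx yy : Int) (hin : inG data xx yy)
    (hL : ¬ PySem.Str.pyGet? (rowAt data yy) xx = some 'L') :
    walkA data dx dy (pvFuel data) xx yy =
      walkA data dx dy (pvFuel data) (xx + dx) (yy + dy) := by
  have hmu := mu_le_fuel data dx dy xx yy hin
  obtain ⟨hy0, hy1, hx0, hx1⟩ := hin
  have hfuel : pvFuel data = (data.length + pvMaxW data + 1) + 1 := rfl
  rw [hfuel, walkA, if_pos ⟨hx0, hy0⟩]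
  have hr := pyGet?_row data hy0 hy1
  split
  · next h => rw [h] at hr; cases hr
  · next row h =>
    have hrow : row = rowAt data yy := by
      rw [h] at hr; exact Option.some.inj hr
    split
    · next hc =>
      rw [hrow] at hc
      have := strGet_ge _ hx0 hc
      rw [rlen] at hx1
      omega
    · next c hc =>
      have hcL : ¬ c = 'L' := by
        intro hcl
        rw [hrow] at hc
        exact hL (by rw [hc, hcl])
      rw [if_neg hcL]
      have hdec := mu_decr data hz ⟨hx0, hy0⟩ h hc
      rw [hrow] at hc
      refine walk_stable data dx dy hz _ _ (xx + dx) (yy + dy) (by rw [hfuel] at hmu; omega)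
        (by rw [hfuel] at hmu; omega)

-- ---------- generic facts about B's sweep folds ----------

theorem stepB_get_ne (data : List String) (dx dy y : Int) (g) (x : Int)
    {p : Int × Int} (hp : p ≠ (x, y)) :
    (stepB data dx dy y g x).get? p = g.get? p := by
  rw [stepB]
  exact PySem.Dict.get?_insert_of_ne _ _ hp

theorem rowfoldB_get_ne (data : List String) (dx dy y : Int) :
    ∀ (xs : List Int) (g) (x' y' : Int), y' ≠ y →
      ((xs.foldl (stepB data dx dy y) g).get? (x', y') = g.get? (x', y')) := by
  intro xs
  induction xs with
  | nil => intro g x' y' h; rfl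
  | cons x0 rest ih =>
    intro g x' y' h
    rw [List.foldl_cons, ih _ x' y' h,
      stepB_get_ne data dx dy y g x0 (by simp only [ne_eq, Prod.mk.injEq]; tauto)]

theorem rowfoldB_get_ne_x (data : List String) (dx dy y : Int) :
    ∀ (xs : List Int) (g) (x' : Int), x' ∉ xs →
      ((xs.foldl (stepB data dx dy y) g).get? (x', y) = g.get? (x', y)) := by
  intro xs
  induction xs with
  | nil => intro g x' h; rfl
  | cons x0 rest ih =>
    intro g x' h
    rw [List.mem_cons, not_or] at h
    rw [List.foldl_cons, ih _ x' h.2,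
      stepB_get_ne data dx dy y g x0 (by simp only [ne_eq, Prod.mk.injEq]; tauto)]

theorem rowB_get_ne (data : List String) (dx dy : Int) (g) (y : Int)
    (x' y' : Int) (h : y' ≠ y) :
    (rowB data dx dy g y).get? (x', y') = g.get? (x', y') := by
  rw [rowB]
  exact rowfoldB_get_ne data dx dy y _ g x' y' h

-- the invariant: all cells of rows satisfying S already carry their walkA value
def InvS (data : List String) (dx dy : Int) (S : Int → Prop)
    (g : PySem.Dict (Int × Int) (Option (Int × Int))) : Prop :=
  ∀ x y, S y → inG data x y →
    g.get? (x, y) = some (walkA data dx dy (pvFuel data) (x + dx) (y + dy))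

-- the value stepB stores for cell (x, y) is the correct walkA value, provided the
-- neighbour cell's value (when needed) is already correct in g
theorem stepB_val (data : List String) (dx dy : Int) (hz : ¬ (dx = 0 ∧ dy = 0))
    (y x : Int) (g) (P : Int → Int → Prop)
    (hInv : ∀ a b, P a b → inG data a b →
      g.get? (a, b) = some (walkA data dx dy (pvFuel data) (a + dx) (b + dy)))
    (hdep : inG data (x + dx) (y + dy) → P (x + dx) (y + dy)) :
    (stepB data dx dy y g x).get? (x, y) =
      some (walkA data dx dy (pvFuel data) (x + dx) (y + dy)) := by
  rw [stepB, PySem.Dict.get?_insert_self]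
  congr 1
  have hrw : ((PySem.List.pyGet? data (y + dy)).getD "") = rowAt data (y + dy) := rfl
  rw [hrw, PySem.Str.len_eq]
  by_cases hyy : 0 ≤ y + dy ∧ y + dy < (data.length : Int)
  · rw [if_pos hyy]
    by_cases hxx : 0 ≤ x + dx ∧ x + dx < ((rowAt data (y + dy)).toList.length : Int)
    · rw [if_pos hxx]
      have hin : inG data (x + dx) (y + dy) := ⟨hyy.1, hyy.2, hxx.1, hxx.2⟩
      by_cases hL : PySem.Str.pyGet? (rowAt data (y + dy)) (x + dx) = some 'L'
      · rw [if_pos hL, walkA_seat data dx dy _ _ hin hL]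
      · rw [if_neg hL, walkA_go data dx dy hz _ _ hin hL,
          PySem.Dict.getD_eq_get?_getD, hInv _ _ (hdep hin) hin]
        rfl
    · rw [if_neg hxx,
        walkA_stop data dx dy _ _ _ (by rintro ⟨-, -, h3, h4⟩; rw [rlen] at h4; exact hxx ⟨h3, h4⟩)]
  · rw [if_neg hyy,
      walkA_stop data dx dy _ _ _ (by rintro ⟨h1, h2, -, -⟩; exact hyy ⟨h1, h2⟩)]

-- case dy ≠ 0: the x-order inside a row is irrelevant
theorem rowfold_a_val (data : List String) (dx dy : Int) (hz : ¬ (dx = 0 ∧ dy = 0))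
    (S : Int → Prop) (y : Int) (hSy : ¬ S y)
    (hdep : 0 ≤ y + dy → y + dy < (data.length : Int) → S (y + dy)) :
    ∀ (xs : List Int), xs.Nodup → ∀ g, InvS data dx dy S g → ∀ x ∈ xs,
      ((xs.foldl (stepB data dx dy y) g).get? (x, y) =
        some (walkA data dx dy (pvFuel data) (x + dx) (y + dy))) := by
  intro xs
  induction xs with
  | nil => intro _ g _ x hx; cases hx
  | cons x0 rest ih =>
    intro hnd g hInv x hx
    rw [List.foldl_cons]
    have hInv1 : InvS data dx dy S (stepB data dx dy y g x0) := by
      intro a b hS hin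
      rw [stepB_get_ne data dx dy y g x0 (by
        simp only [ne_eq, Prod.mk.injEq, not_and]
        intro _ hby; exact absurd (hby ▸ hS) hSy)]
      exact hInv a b hS hin
    rcases List.mem_cons.mp hx with rfl | hx
    · rw [rowfoldB_get_ne_x data dx dy y rest _ x (List.nodup_cons.mp hnd).1]
      exact stepB_val data dx dy hz y x g (fun _ b => S b)
        (fun a b hS hin => hInv a b hS hin)
        (fun hin => hdep hin.1 hin.2.1)
    · exact ih (List.nodup_cons.mp hnd).2 _ hInv1 x hx

-- case dy = 0: within the row, each cell's neighbour was processed earlier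
theorem rowfold_b_val (data : List String) (dx : Int) (hz : ¬ (dx = 0 ∧ (0:Int) = 0))
    (y : Int) :
    ∀ (xs done : List Int) (g),
      (∀ x ∈ done, g.get? (x, y) = some (walkA data dx 0 (pvFuel data) (x + dx) (y + 0)))
      → (∀ l1 x l2, xs = l1 ++ x :: l2 → 0 ≤ x + dx → x + dx < rlen data y →
          (x + dx) ∈ done ++ l1)
      → (done ++ xs).Nodup
      → ∀ x ∈ done ++ xs,
        ((xs.foldl (stepB data dx 0 y) g).get? (x, y) =
          some (walkA data dx 0 (pvFuel data) (x + dx) (y + 0))) := by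
  intro xs
  induction xs with
  | nil =>
    intro done g hdone _ _ x hx
    simp only [List.append_nil] at hx
    exact hdone x hx
  | cons x0 rest ih =>
    intro done g hdone hord hnd x hx
    rw [List.foldl_cons]
    obtain ⟨hndD, hndC, hdisj⟩ := List.nodup_append.mp hnd
    have hx0done : x0 ∉ done := fun hmem => hdisj x0 hmem x0 (by simp) rfl
    have hval0 : (stepB data dx 0 y g x0).get? (x0, y) =
        some (walkA data dx 0 (pvFuel data) (x0 + dx) (y + 0)) := by
      refine stepB_val data dx 0 hz y x0 g (fun a b => b = y ∧ a ∈ done) ?_ ?_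
      · rintro a b ⟨rfl, ha⟩ _
        exact hdone a ha
      · intro hin
        refine ⟨by omega, ?_⟩
        have := hord [] x0 rest rfl hin.2.2.1 (by
          have h4 := hin.2.2.2
          simpa using h4)
        simpa using this
    have hdone' : ∀ x ∈ done ++ [x0],
        (stepB data dx 0 y g x0).get? (x, y) =
          some (walkA data dx 0 (pvFuel data) (x + dx) (y + 0)) := by
      intro x hx'
      rcases List.mem_append.mp hx' with hx' | hx'
      · rw [stepB_get_ne data dx 0 y g x0 (by
          simp only [ne_eq, Prod.mk.injEq, not_and]
          intro hxe _; exact absurd (hxe ▸ hx') hx0done)]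
        exact hdone x hx'
      · simp only [List.mem_singleton] at hx'
        subst hx'
        exact hval0
    have hord' : ∀ l1 x l2, rest = l1 ++ x :: l2 → 0 ≤ x + dx →
        x + dx < rlen data y → (x + dx) ∈ (done ++ [x0]) ++ l1 := by
      intro l1 x l2 hsplit hb1 hb2
      have := hord (x0 :: l1) x l2 (by rw [hsplit]; rfl) hb1 hb2
      simpa [List.append_assoc] using this
    have hnd' : ((done ++ [x0]) ++ rest).Nodup := by
      simpa [List.append_assoc] using hnd
    have hall := ih (done ++ [x0]) _ hdone' hord' hnd'
    rcases List.mem_append.mp hx with hxd | hxc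
    · exact hall x (by simp [hxd])
    · rcases List.mem_cons.mp hxc with rfl | hxr
      · exact hall x (by simp)
      · exact hall x (by simp [hxr])

-- ---------- order facts about the sweep ranges ----------

theorem map_range_decomp {α : Type} (f : Nat → α) (n : Nat) :
    ∀ (l1 : List α) (y : α) (l2 : List α), (List.range n).map f = l1 ++ y :: l2 →
      l1.length < n ∧ y = f l1.length ∧ l1 = (List.range l1.length).map f := by
  intro l1 y l2 h
  have hlen : n = l1.length + 1 + l2.length := by
    have hc := congrArg List.length h
    simp at hc
    omega
  have hlt : l1.length < n := by omega
  refine ⟨hlt, ?_, ?_⟩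
  · have := congrArg (fun l => l[l1.length]?) h
    simp only [List.getElem?_map, List.getElem?_range hlt] at this
    rw [List.getElem?_append_right (le_refl _)] at this
    simpa using this.symm
  · have h2 := congrArg (List.take l1.length) h
    rw [List.take_append_of_le_length (le_refl _), List.take_length] at h2
    rw [← List.map_take, List.take_range, Nat.min_eq_left hlt.le] at h2
    exact h2.symm

theorem nodup_pyRange_neg_one (a b : Int) : (PySem.List.pyRange a b (-1)).Nodup := by
  rw [PySem.List.pyRange_neg_one_eq_reverse]
  exact List.nodup_reverse.mpr (PySem.List.nodup_pyRange_one _ _)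

-- the x-range B uses inside row y covers exactly the in-row indices, without duplicates
theorem xsB_mem (data : List String) (dx y : Int) (x : Int)
    (h0 : 0 ≤ x) (h1 : x < rlen data y) :
    x ∈ (if 0 < dx then
           PySem.List.pyRange (PySem.Str.len ((PySem.List.pyGet? data y).getD "") - 1) (-1) (-1)
         else PySem.List.pyRange 0 (PySem.Str.len ((PySem.List.pyGet? data y).getD ""))) := by
  have hrw : ((PySem.List.pyGet? data y).getD "") = rowAt data y := rfl
  rw [hrw, PySem.Str.len_eq]
  split
  · exact PySem.List.mem_pyRange_neg_one.mpr ⟨by omega, by rw [rlen] at h1; omega⟩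
  · exact PySem.List.mem_pyRange_one.mpr ⟨h0, by rw [rlen] at h1; omega⟩

theorem xsB_nodup (data : List String) (dx y : Int) :
    (if 0 < dx then
       PySem.List.pyRange (PySem.Str.len ((PySem.List.pyGet? data y).getD "") - 1) (-1) (-1)
     else PySem.List.pyRange 0 (PySem.Str.len ((PySem.List.pyGet? data y).getD ""))).Nodup := by
  split
  · exact nodup_pyRange_neg_one _ _
  · exact PySem.List.nodup_pyRange_one _ _

theorem range_desc_full {a b : Int} :
    ∀ (l1 : List Int) (y : Int) (l2 : List Int),
      PySem.List.pyRange a b (-1) = l1 ++ y :: l2 →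
      b < y ∧ y ≤ a ∧ (∀ z, y < z → z ≤ a → z ∈ l1) := by
  intro l1 y l2 h
  rw [PySem.List.pyRange_neg_one] at h
  obtain ⟨hlt, hy, hl1⟩ := map_range_decomp _ _ l1 y l2 h
  refine ⟨by omega, by omega, ?_⟩
  intro z hz1 hz2
  rw [hl1]
  refine List.mem_map.mpr ⟨(a - z).toNat, List.mem_range.mpr (by omega), by omega⟩

theorem range_asc_full {a b : Int} :
    ∀ (l1 : List Int) (y : Int) (l2 : List Int),
      PySem.List.pyRange a b 1 = l1 ++ y :: l2 →
      a ≤ y ∧ y < b ∧ (∀ z, a ≤ z → z < y → z ∈ l1) := by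
  intro l1 y l2 h
  rw [PySem.List.pyRange_one] at h
  obtain ⟨hlt, hy, hl1⟩ := map_range_decomp _ _ l1 y l2 h
  refine ⟨by omega, by omega, ?_⟩
  intro z hz1 hz2
  rw [hl1]
  refine List.mem_map.mpr ⟨(z - a).toNat, List.mem_range.mpr (by omega), by omega⟩

-- each cell's in-row neighbour (for dy = 0) is processed earlier in B's x-order
theorem xsB_ord (data : List String) (dx y : Int) (hdx : dx ≠ 0) :
    ∀ l1 x l2,
      (if 0 < dx then
         PySem.List.pyRange (PySem.Str.len ((PySem.List.pyGet? data y).getD "") - 1) (-1) (-1)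
       else PySem.List.pyRange 0 (PySem.Str.len ((PySem.List.pyGet? data y).getD ""))) =
        l1 ++ x :: l2 →
      0 ≤ x + dx → x + dx < rlen data y → (x + dx) ∈ l1 := by
  have hrw : ((PySem.List.pyGet? data y).getD "") = rowAt data y := rfl
  rw [hrw, PySem.Str.len_eq]
  intro l1 x l2 h hb1 hb2
  rw [rlen] at hb2
  split at h
  · next hpos =>
    obtain ⟨-, h2, h3⟩ := range_desc_full l1 x l2 h
    exact h3 _ (by omega) (by omega)
  · next hpos =>
    have hneg : dx < 0 := by omega
    obtain ⟨-, h2, h3⟩ := range_asc_full l1 x l2 h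
    exact h3 _ (by omega) (by omega)

-- each row's neighbour row (for dy ≠ 0) is processed earlier in B's y-order
theorem ysB_ord (data : List String) (dy : Int) (hdy : dy ≠ 0) :
    ∀ l1 y l2,
      (if 0 < dy then PySem.List.pyRange ((data.length : Int) - 1) (-1) (-1)
       else PySem.List.pyRange 0 (data.length : Int)) = l1 ++ y :: l2 →
      0 ≤ y + dy → y + dy < (data.length : Int) → (y + dy) ∈ l1 := by
  intro l1 y l2 h hb1 hb2
  split at h
  · next hpos =>
    obtain ⟨-, h2, h3⟩ := range_desc_full l1 y l2 h
    exact h3 _ (by omega) (by omega)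
  · next hpos =>
    have hneg : dy < 0 := by omega
    obtain ⟨-, h2, h3⟩ := range_asc_full l1 y l2 h
    exact h3 _ (by omega) (by omega)

theorem ysB_mem (data : List String) (dy y : Int) (h0 : 0 ≤ y)
    (h1 : y < (data.length : Int)) :
    y ∈ (if 0 < dy then PySem.List.pyRange ((data.length : Int) - 1) (-1) (-1)
         else PySem.List.pyRange 0 (data.length : Int)) := by
  split
  · exact PySem.List.mem_pyRange_neg_one.mpr ⟨by omega, by omega⟩
  · exact PySem.List.mem_pyRange_one.mpr ⟨h0, h1⟩

theorem ysB_nodup (data : List String) (dy : Int) :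
    (if 0 < dy then PySem.List.pyRange ((data.length : Int) - 1) (-1) (-1)
     else PySem.List.pyRange 0 (data.length : Int)).Nodup := by
  split
  · exact nodup_pyRange_neg_one _ _
  · exact PySem.List.nodup_pyRange_one _ _

-- one full row of B's sweep makes that row correct (dy ≠ 0 case)
theorem rowB_correct_a (data : List String) (dx dy : Int) (hz : ¬ (dx = 0 ∧ dy = 0))
    (S : Int → Prop) (y : Int) (hSy : ¬ S y)
    (hdep : 0 ≤ y + dy → y + dy < (data.length : Int) → S (y + dy))
    (g) (hInv : InvS data dx dy S g) :
    ∀ x, inG data x y →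
      (rowB data dx dy g y).get? (x, y) =
        some (walkA data dx dy (pvFuel data) (x + dx) (y + dy)) := by
  intro x hin
  rw [rowB]
  exact rowfold_a_val data dx dy hz S y hSy hdep _ (xsB_nodup data dx y) g hInv
    x (xsB_mem data dx y x hin.2.2.1 hin.2.2.2)

-- one full row of B's sweep makes that row correct (dy = 0 case)
theorem rowB_correct_b (data : List String) (dx : Int) (hz : ¬ (dx = 0 ∧ (0:Int) = 0))
    (hdx : dx ≠ 0) (y : Int) (g) :
    ∀ x, inG data x y →
      (rowB data dx 0 g y).get? (x, y) =
        some (walkA data dx 0 (pvFuel data) (x + dx) (y + 0)) := by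
  intro x hin
  rw [rowB]
  exact rowfold_b_val data dx hz y _ [] g (by intro x hx; cases hx)
    (by
      intro l1 x' l2 hsplit hb1 hb2
      simpa using xsB_ord data dx y hdx l1 x' l2 hsplit hb1 hb2)
    (by simpa using xsB_nodup data dx y)
    x (by simpa using xsB_mem data dx y x hin.2.2.1 hin.2.2.2)

-- outer sweep over the rows, dy ≠ 0
theorem colfold_a (data : List String) (dx dy : Int) (hz : ¬ (dx = 0 ∧ dy = 0))
    (_hdy : dy ≠ 0) :
    ∀ (ys doneY : List Int) (g),
      InvS data dx dy (· ∈ doneY) g →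
      (∀ l1 y l2, ys = l1 ++ y :: l2 → 0 ≤ y + dy → y + dy < (data.length : Int) →
        (y + dy) ∈ doneY ++ l1) →
      (doneY ++ ys).Nodup →
      InvS data dx dy (· ∈ doneY ++ ys) (ys.foldl (rowB data dx dy) g) := by
  intro ys
  induction ys with
  | nil =>
    intro doneY g hInv _ _
    simpa using hInv
  | cons y0 rest ih =>
    intro doneY g hInv hord hnd
    rw [List.foldl_cons]
    obtain ⟨hndD, hndC, hdisj⟩ := List.nodup_append.mp hnd
    have hy0done : y0 ∉ doneY := fun hmem => hdisj y0 hmem y0 (by simp) rfl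
    have hInv1 : InvS data dx dy (· ∈ doneY ++ [y0]) (rowB data dx dy g y0) := by
      intro x y hS hin
      rcases List.mem_append.mp hS with hS | hS
      · rw [rowB_get_ne data dx dy g y0 x y (by
          intro he; exact hy0done (he ▸ hS))]
        exact hInv x y hS hin
      · simp only [List.mem_singleton] at hS
        subst hS
        exact rowB_correct_a data dx dy hz (· ∈ doneY) y hy0done
          (fun h1 h2 => by simpa using hord [] y rest rfl h1 h2) g hInv x hin
    have hord' : ∀ l1 y l2, rest = l1 ++ y :: l2 → 0 ≤ y + dy →
        y + dy < (data.length : Int) → (y + dy) ∈ (doneY ++ [y0]) ++ l1 := by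
      intro l1 y l2 hsplit hb1 hb2
      have := hord (y0 :: l1) y l2 (by rw [hsplit]; rfl) hb1 hb2
      simpa [List.append_assoc] using this
    have hnd' : ((doneY ++ [y0]) ++ rest).Nodup := by
      simpa [List.append_assoc] using hnd
    have := ih (doneY ++ [y0]) _ hInv1 hord' hnd'
    intro x y hS hin
    exact this x y (by simpa [List.append_assoc] using hS) hin

-- outer sweep over the rows, dy = 0 (rows are independent)
theorem colfold_b (data : List String) (dx : Int) (hz : ¬ (dx = 0 ∧ (0:Int) = 0))
    (hdx : dx ≠ 0) :
    ∀ (ys doneY : List Int) (g),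
      InvS data dx 0 (· ∈ doneY) g →
      (doneY ++ ys).Nodup →
      InvS data dx 0 (· ∈ doneY ++ ys) (ys.foldl (rowB data dx 0) g) := by
  intro ys
  induction ys with
  | nil =>
    intro doneY g hInv _
    simpa using hInv
  | cons y0 rest ih =>
    intro doneY g hInv hnd
    rw [List.foldl_cons]
    obtain ⟨hndD, hndC, hdisj⟩ := List.nodup_append.mp hnd
    have hy0done : y0 ∉ doneY := fun hmem => hdisj y0 hmem y0 (by simp) rfl
    have hInv1 : InvS data dx 0 (· ∈ doneY ++ [y0]) (rowB data dx 0 g y0) := by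
      intro x y hS hin
      rcases List.mem_append.mp hS with hS | hS
      · rw [rowB_get_ne data dx 0 g y0 x y (by
          intro he; exact hy0done (he ▸ hS))]
        exact hInv x y hS hin
      · simp only [List.mem_singleton] at hS
        subst hS
        exact rowB_correct_b data dx hz hdx y g x hin
    have hnd' : ((doneY ++ [y0]) ++ rest).Nodup := by
      simpa [List.append_assoc] using hnd
    have := ih (doneY ++ [y0]) _ hInv1 hnd'
    intro x y hS hin
    exact this x y (by simpa [List.append_assoc] using hS) hin

-- B's per-direction table holds exactly A's walk values on all grid cells
theorem gTable_correct (data : List String) (dx dy : Int) (hz : ¬ (dx = 0 ∧ dy = 0)) :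
    ∀ x y, inG data x y →
      (gTable data dx dy).get? (x, y) =
        some (walkA data dx dy (pvFuel data) (x + dx) (y + dy)) := by
  intro x y hin
  rw [gTable]
  by_cases hdy : dy = 0
  · subst hdy
    have hdx : dx ≠ 0 := fun h => hz ⟨h, rfl⟩
    have := colfold_b data dx hz hdx
      (if 0 < (0:Int) then PySem.List.pyRange ((data.length : Int) - 1) (-1) (-1)
       else PySem.List.pyRange 0 (data.length : Int)) [] PySem.Dict.empty
      (by intro a b hb _; cases hb) (by simpa using ysB_nodup data 0)
    exact this x y (by simpa using ysB_mem data 0 y hin.1 hin.2.1) hin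
  · have := colfold_a data dx dy hz hdy
      (if 0 < dy then PySem.List.pyRange ((data.length : Int) - 1) (-1) (-1)
       else PySem.List.pyRange 0 (data.length : Int)) [] PySem.Dict.empty
      (by intro a b hb _; cases hb)
      (by
        intro l1 y' l2 hsplit hb1 hb2
        simpa using ysB_ord data dy hdy l1 y' l2 hsplit hb1 hb2)
      (by simpa using ysB_nodup data dy)
    exact this x y (by simpa using ysB_mem data dy y hin.1 hin.2.1) hin

-- ---------- the direction table f and the branch lists ----------

theorem foldl_insert_get_ne {κ ν : Type} [BEq κ] [LawfulBEq κ] (G : κ → ν) :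
    ∀ (l : List κ) (f0 : PySem.Dict κ ν) (d : κ), d ∉ l →
      (l.foldl (fun f d' => f.insert d' (G d')) f0).get? d = f0.get? d := by
  intro l
  induction l with
  | nil => intro f0 d _; rfl
  | cons a rest ih =>
    intro f0 d hd
    rw [List.mem_cons, not_or] at hd
    rw [List.foldl_cons, ih _ _ hd.2, PySem.Dict.get?_insert_of_ne _ _ hd.1]

theorem foldl_insert_get {κ ν : Type} [BEq κ] [LawfulBEq κ] (G : κ → ν) :
    ∀ (l : List κ) (f0 : PySem.Dict κ ν) (d : κ), l.Nodup → d ∈ l →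
      (l.foldl (fun f d' => f.insert d' (G d')) f0).get? d = some (G d) := by
  intro l
  induction l with
  | nil => intro f0 d _ hd; cases hd
  | cons a rest ih =>
    intro f0 d hnd hd
    rw [List.foldl_cons]
    rcases List.mem_cons.mp hd with rfl | hd
    · rw [foldl_insert_get_ne G rest _ d (List.nodup_cons.mp hnd).1,
        PySem.Dict.get?_insert_self]
    · exact ih _ d (List.nodup_cons.mp hnd).2 hd

theorem dirsL_nz : ∀ d ∈ dirsL, ¬ (d.1 = 0 ∧ d.2 = 0) := by decide

theorem dirsL_nodup : dirsL.Nodup := by decide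

def fB (data : List String) : PySem.Dict (Int × Int) (PySem.Dict (Int × Int) (Option (Int × Int))) :=
  dirsL.foldl (fun f d => f.insert d (gTable data d.1 d.2)) PySem.Dict.empty

-- one direction-step of A's branches loop
def branchStep (data : List String) (x y : Int)
    (bs : List (Int × Int)) (d : Int × Int) : List (Int × Int) :=
  match walkA data d.1 d.2 (pvFuel data) (x + d.1) (y + d.2) with
  | some t => bs ++ [t]
  | none => bs

theorem branchfold_eq (data : List String) (x y : Int) :
    ∀ (l : List (Int × Int)) (bs : List (Int × Int)),
      l.foldl (branchStep data x y) bs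
        = bs ++ l.filterMap (fun d => walkA data d.1 d.2 (pvFuel data) (x + d.1) (y + d.2)) := by
  intro l
  induction l with
  | nil => intro bs; simp
  | cons a rest ih =>
    intro bs
    rw [List.foldl_cons, List.filterMap_cons]
    cases hw : walkA data a.1 a.2 (pvFuel data) (x + a.1) (y + a.2) <;>
      simp [branchStep, hw, ih]

-- the branch list B assembles for a seat equals the one A's ray walks assemble
theorem seatlist_eq (data : List String) (x y : Int) (hin : inG data x y) :
    ((dirsL.map (fun d => ((fB data).getD d PySem.Dict.empty).getD (x, y) none)).filterMap id)
      = dirsL.foldl (branchStep data x y) [] := by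
  rw [branchfold_eq data x y dirsL []]
  rw [List.filterMap_map]
  rw [List.nil_append]
  refine List.filterMap_congr ?_
  intro d hd
  have h1 : (fB data).get? d = some (gTable data d.1 d.2) :=
    foldl_insert_get _ dirsL _ d dirsL_nodup hd
  rw [Function.comp_apply, id_eq, PySem.Dict.getD_eq_get?_getD (fB data) d PySem.Dict.empty, h1]
  show (gTable data d.1 d.2).getD (x, y) none = _
  rw [PySem.Dict.getD_eq_get?_getD, gTable_correct data d.1 d.2 (dirsL_nz d hd) x y hin]
  rfl

-- ---------- the assembly loops of A and B ----------

def aIn (data : List String) (y : Int)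
    (graph : PySem.Dict (Int × Int) (List (Int × Int))) (xc : Int × Char) :
    PySem.Dict (Int × Int) (List (Int × Int)) :=
  if xc.2 = 'L' then
    graph.insert (xc.1, y)
      (dirsL.foldl (branchStep data xc.1 y) (graph.getD (xc.1, y) []))
  else graph

def bIn (_data : List String)
    (f : PySem.Dict (Int × Int) (PySem.Dict (Int × Int) (Option (Int × Int)))) (y : Int)
    (graph : PySem.Dict (Int × Int) (List (Int × Int))) (xc : Int × Char) :
    PySem.Dict (Int × Int) (List (Int × Int)) :=
  if xc.2 = 'L' then
    graph.insert (xc.1, y)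
      ((dirsL.map (fun d => (f.getD d PySem.Dict.empty).getD (xc.1, y) none)).filterMap id)
  else graph

theorem gen2_unfold (data : List String) :
    gen2 data =
      ((PySem.List.enumerate data).foldl (fun graph yl =>
        (PySem.List.enumerate yl.2.toList).foldl (aIn data yl.1) graph)
        PySem.Dict.empty).items.map (fun p => (p.1.1, p.1.2, p.2)) := rfl

theorem gen2_alt_unfold (data : List String) :
    gen2_alt data =
      ((PySem.List.enumerate data).foldl (fun graph yl =>
        (PySem.List.enumerate yl.2.toList).foldl (bIn data (fB data) yl.1) graph)
        PySem.Dict.empty).items.map (fun p => (p.1.1, p.1.2, p.2)) := rfl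

theorem inner_eq (data : List String) (y : Int) (line : String) (hy0 : 0 ≤ y)
    (hrow : PySem.List.pyGet? data y = some line) :
    ∀ (cs : List Char) (t : Int) (g : PySem.Dict (Int × Int) (List (Int × Int))),
      0 ≤ t →
      (∀ (k : Nat) (hk : k < cs.length), PySem.Str.pyGet? line (t + (k : Int)) = some cs[k]) →
      (∀ x', t ≤ x' → g.get? (x', y) = none) →
      ((PySem.List.enumerate cs t).foldl (aIn data y) g
         = (PySem.List.enumerate cs t).foldl (bIn data (fB data) y) g)
      ∧ ∀ x' y', (y' ≠ y ∨ x' < t) →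
          ((PySem.List.enumerate cs t).foldl (aIn data y) g).get? (x', y') = g.get? (x', y') := by
  intro cs
  induction cs with
  | nil =>
    intro t g _ _ _
    rw [PySem.List.enumerate_nil]
    simp only [List.foldl_nil]
    exact ⟨trivial, fun _ _ _ => trivial⟩
  | cons c0 rest ih =>
    intro t g ht0 hsub hfresh
    rw [PySem.List.enumerate_cons, List.foldl_cons, List.foldl_cons]
    by_cases hc : c0 = 'L'
    · -- a seat: both sides insert the same branch list at the fresh key (t, y)
      have hchar : PySem.Str.pyGet? line t = some c0 := by
        have := hsub 0 (by simp)
        simpa using this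
      have hin : inG data t y := by
        refine ⟨hy0, listGet_lt data hy0 hrow, ht0, ?_⟩
        have := strGet_lt line ht0 hchar
        rw [rlen, rowAt_eq hrow]
        exact this
      have hkey : g.getD (t, y) [] = [] := by
        rw [PySem.Dict.getD_eq_get?_getD, hfresh t (le_refl t)]
        rfl
      have hval : dirsL.foldl (branchStep data t y) (g.getD (t, y) [])
          = (dirsL.map (fun d =>
              ((fB data).getD d PySem.Dict.empty).getD (t, y) none)).filterMap id := by
        rw [hkey]
        exact (seatlist_eq data t y hin).symm
      have hstep : aIn data y g (t, c0) = bIn data (fB data) y g (t, c0) := by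
        rw [aIn, bIn, if_pos hc, if_pos hc, hval]
      rw [hstep]
      set g1 := bIn data (fB data) y g (t, c0) with hg1
      have hg1get : ∀ x' y', (x', y') ≠ (t, y) → g1.get? (x', y') = g.get? (x', y') := by
        intro x' y' hne
        rw [hg1, bIn, if_pos hc]
        exact PySem.Dict.get?_insert_of_ne _ _ hne
      have hsub' : ∀ (k : Nat) (hk : k < rest.length),
          PySem.Str.pyGet? line (t + 1 + (k : Int)) = some rest[k] := by
        intro k hk
        have := hsub (k + 1) (by simpa using Nat.succ_lt_succ hk)
        have harith : t + ((k : Int) + 1) = t + 1 + (k : Int) := by ring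
        simpa [harith] using this
      have hfresh' : ∀ x', t + 1 ≤ x' → g1.get? (x', y) = none := by
        intro x' hx'
        rw [hg1get x' y (by simp only [ne_eq, Prod.mk.injEq]; intro h; omega)]
        exact hfresh x' (by omega)
      obtain ⟨heq, hpres⟩ := ih (t + 1) g1 (by omega) hsub' hfresh'
      refine ⟨heq, ?_⟩
      intro x' y' hcond
      rw [hpres x' y' (by omega),
        hg1get x' y' (by
          simp only [ne_eq, Prod.mk.injEq]
          rcases hcond with h | h
          · intro hh; exact h hh.2
          · intro hh; omega)]
    · -- not a seat: both sides leave the dict unchanged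
      have hstepA : aIn data y g (t, c0) = g := by rw [aIn, if_neg hc]
      have hstepB : bIn data (fB data) y g (t, c0) = g := by rw [bIn, if_neg hc]
      rw [hstepA, hstepB]
      have hsub' : ∀ (k : Nat) (hk : k < rest.length),
          PySem.Str.pyGet? line (t + 1 + (k : Int)) = some rest[k] := by
        intro k hk
        have := hsub (k + 1) (by simpa using Nat.succ_lt_succ hk)
        have harith : t + ((k : Int) + 1) = t + 1 + (k : Int) := by ring
        simpa [harith] using this
      obtain ⟨heq, hpres⟩ := ih (t + 1) g (by omega)
        hsub' (fun x' hx' => hfresh x' (by omega))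
      refine ⟨heq, ?_⟩
      intro x' y' hcond
      exact hpres x' y' (by omega)

theorem outer_eq (data : List String) :
    ∀ (ds : List String) (s : Int) (g : PySem.Dict (Int × Int) (List (Int × Int))),
      0 ≤ s →
      (∀ (k : Nat) (hk : k < ds.length), PySem.List.pyGet? data (s + (k : Int)) = some ds[k]) →
      (∀ x' y', s ≤ y' → g.get? (x', y') = none) →
      ((PySem.List.enumerate ds s).foldl (fun graph yl =>
          (PySem.List.enumerate yl.2.toList).foldl (aIn data yl.1) graph) g
        = (PySem.List.enumerate ds s).foldl (fun graph yl =>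
          (PySem.List.enumerate yl.2.toList).foldl (bIn data (fB data) yl.1) graph) g) := by
  intro ds
  induction ds with
  | nil =>
    intro s g _ _ _
    rw [PySem.List.enumerate_nil]
    simp only [List.foldl_nil]
  | cons d0 rest ih =>
    intro s g hs0 hsub hfresh
    rw [PySem.List.enumerate_cons, List.foldl_cons, List.foldl_cons]
    have hrow : PySem.List.pyGet? data s = some d0 := by
      have := hsub 0 (by simp)
      simpa using this
    have hcsub : ∀ (k : Nat) (hk : k < d0.toList.length),
        PySem.Str.pyGet? d0 ((0 : Int) + (k : Int)) = some d0.toList[k] := by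
      intro k hk
      have h0k : (0 : Int) + (k : Int) = ((k : Nat) : Int) := by omega
      rw [h0k, PySem.Str.pyGet?_natCast, List.getElem?_eq_getElem hk]
    have hrfresh : ∀ x', (0 : Int) ≤ x' → g.get? (x', s) = none :=
      fun x' _ => hfresh x' s (le_refl s)
    obtain ⟨heq, hpres⟩ := inner_eq data s d0 hs0 hrow d0.toList 0 g (le_refl 0) hcsub hrfresh
    rw [heq]
    have hpres1 : ∀ x' y', y' ≠ s →
        ((PySem.List.enumerate d0.toList 0).foldl (bIn data (fB data) s) g).get? (x', y')
          = g.get? (x', y') := by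
      intro x' y' hne
      rw [← heq]
      exact hpres x' y' (Or.inl hne)
    have hsub' : ∀ (k : Nat) (hk : k < rest.length),
        PySem.List.pyGet? data (s + 1 + (k : Int)) = some rest[k] := by
      intro k hk
      have := hsub (k + 1) (by simpa using Nat.succ_lt_succ hk)
      have harith : s + ((k : Int) + 1) = s + 1 + (k : Int) := by ring
      simpa [harith] using this
    have hfresh' : ∀ x' y', s + 1 ≤ y' →
        ((PySem.List.enumerate d0.toList 0).foldl (bIn data (fB data) s) g).get? (x', y') = none := by
      intro x' y' hy'
      rw [hpres1 x' y' (by omega)]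
      exact hfresh x' y' (by omega)
    exact ih (s + 1) _ (by omega) hsub' hfresh'

-- ===== VERDICT (by name: the statement is the Claim_ definition above) =====
theorem gen2_spec : Claim_equal_gen2 := by
  intro data _
  unfold Spec_gen2
  rw [gen2_unfold, gen2_alt_unfold]
  have hmain := outer_eq data data 0 PySem.Dict.empty (le_refl 0)
    (by
      intro k hk
      have h0k : (0 : Int) + (k : Int) = ((k : Nat) : Int) := by omega
      rw [h0k, PySem.List.pyGet?_natCast, List.getElem?_eq_getElem hk])
    (fun x' y' _ => PySem.Dict.get?_empty _)
  rw [hmain]
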